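-- pv_equiv track=rewrite | github.com/divyeshmundhra/MDP---Group-13 | algorithms/src/agent/AgentInterface.py | convert_mdf_to_binary
-- ===== SOURCE A (Python) =====
-- def convert_mdf_to_binary(readmap):
--     #input hex string
--     bin_str = "{:b}".format(int(readmap, 16))
--     num_pad_bits = len(readmap) * 4 - len(bin_str)
--     readmap_bin = "0" * num_pad_bits + bin_str
--
--     #remove the last padding 4 binary bits
--     readmap_bin = readmap_bin[:-4]
--
--     #mirror the binary string so that the map will generate correctly
--     readmap_bin_1 = [readmap_bin[i:i+15] + '\n' for i in range(0, len(readmap_bin), 15)]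
--     readmap_bin_2 = ''.join(readmap_bin_1)
--     lines = readmap_bin_2.split("\n")
--     reordered = lines[::-1]
--     readmap_final = "\n".join(reordered)
--     return readmap_final
-- ===== SOURCE B (Python) =====
-- def convert_mdf_to_binary(readmap):
--     # build the binary string nibble by nibble instead of via one big int + pad arithmetic
--     bits = ''.join(format(int(c, 16), '04b') for c in readmap)[:-4]
--     # build the reversed-lines result directly, prepending each 15-bit chunk
--     out = ''
--     for i in range(0, len(bits), 15):
--         out = '\n' + bits[i:i+15] + out
--     return out
-- ===== Notes on version B (the rewrite author's own statement) =====
-- stated objective: simpler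
-- what changed: B maps each hex digit to its own 4-bit pattern instead of parsing the whole string into one big int and computing pad bits, and builds the reversed-line output directly by prepending each 15-bit chunk, replacing A's list-comprehension + join + split + reverse + join pipeline.
-- outside the precondition, e.g. on convert_mdf_to_binary(' 7 '): A returns '\n00000000', B raises ValueError; on convert_mdf_to_binary('+5'): A returns '\n0000', B raises ValueError; on convert_mdf_to_binary('0x10'): A returns '\n000000000001', B raises ValueError
import Mathlib
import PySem

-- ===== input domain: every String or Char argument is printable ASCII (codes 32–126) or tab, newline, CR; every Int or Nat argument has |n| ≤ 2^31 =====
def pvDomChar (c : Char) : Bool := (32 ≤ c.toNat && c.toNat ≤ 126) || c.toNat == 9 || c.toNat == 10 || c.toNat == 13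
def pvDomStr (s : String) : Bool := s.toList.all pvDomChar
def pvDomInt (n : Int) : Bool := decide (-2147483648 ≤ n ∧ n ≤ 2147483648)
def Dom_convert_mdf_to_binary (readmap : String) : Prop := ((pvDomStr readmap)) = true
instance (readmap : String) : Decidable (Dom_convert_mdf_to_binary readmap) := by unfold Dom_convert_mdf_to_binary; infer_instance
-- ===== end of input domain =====

-- B builds the binary string nibble by nibble and prepends 15-bit chunks directly,
-- replacing A's whole-string int-parse + pad arithmetic + join/split/reverse pipeline (objective: simpler).


-- ===== PORT A =====
-- int(s, 16) is ported BY HAND below (PySem.Int.ofStrBase? computes it, but its digit-loop is a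
-- private definition whose recursion equations the equivalence proof needs). pyIntHex? is an exact
-- step-for-step port of CPython's int(s, 16), specialised to base 16: strip int-whitespace on both
-- ends, optional sign, optional 0x/0X prefix (a single '_' may follow the prefix), then digits with
-- single '_' separators between them; none exactly where Python raises ValueError.
def pyHexDigitOk (c : Char) : Bool :=
  match PySem.Int.digitVal? c with
  | some d => decide (d < 16)
  | none => false

def pyDigits16Go : List Char → Bool → Nat → Option Nat
  | [], afterDigit, acc => if afterDigit then some acc else none
  | c :: rest, afterDigit, acc =>
    if pyHexDigitOk c then pyDigits16Go rest true (acc * 16 + (PySem.Int.digitVal? c).getD 0)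
    else if c = '_' ∧ afterDigit then
      match rest with
      | d :: _ => if pyHexDigitOk d then pyDigits16Go rest false acc else none
      | [] => none
    else none

def pyDigits16? (ds : List Char) : Option Nat :=
  match ds with
  | [] => none
  | _ => pyDigits16Go ds false 0

def pyIntHex? (s : List Char) : Option Int :=
  let t := ((s.dropWhile PySem.Int.isIntSpace).reverse.dropWhile PySem.Int.isIntSpace).reverse
  let p :=
    match t with
    | c :: r => if c = '-' then (true, r) else if c = '+' then (false, r) else (false, c :: r)
    | [] => (false, ([] : List Char))
  let usePfx : Bool :=
    match p.2 with
    | c0 :: c1 :: _ => c0 = '0' && (c1 = 'x' || c1 = 'X')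
    | _ => false
  let ds :=
    if usePfx then
      match p.2.drop 2 with
      | '_' :: d :: r => if pyHexDigitOk d then d :: r else '_' :: d :: r
      | r => r
    else p.2
  match pyDigits16? ds with
  | none => none
  | some n => some (if p.1 then -(n : Int) else (n : Int))

def convert_mdf_to_binary (readmap : String) : String :=
  let n : Int := (pyIntHex? readmap.toList).getD 0
  let bin_str := PySem.Int.toBinChars n
  let num_pad_bits : Int := (readmap.toList.length : Int) * 4 - (bin_str.length : Int)
  let readmap_bin := List.replicate num_pad_bits.toNat '0' ++ bin_str
  let readmap_bin' := PySem.List.slice readmap_bin none (some (-4))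
  let readmap_bin_1 := (PySem.List.pyRange 0 (readmap_bin'.length : Int) 15).map
      (fun i => PySem.List.slice readmap_bin' (some i) (some (i + 15)) ++ ['\n'])
  let readmap_bin_2 := readmap_bin_1.flatten
  let lines := PySem.Chars.splitOn readmap_bin_2 ['\n']
  let reordered := (PySem.List.slice? lines none none (-1)).getD []
  String.ofList (PySem.Chars.join ['\n'] reordered)

-- ===== PORT B =====
-- format(int(c, 16), '04b') = the 4 binary digits of the digit's value, zero-filled to width 4.
def nibbleBits (c : Char) : List Char :=
  PySem.Chars.zfill (PySem.Int.toBinChars ((PySem.Int.ofCharsBase? [c] 16).getD 0)) 4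

def convert_mdf_to_binary_alt (readmap : String) : String :=
  let bits := PySem.List.slice (readmap.toList.flatMap nibbleBits) none (some (-4))
  String.ofList ((PySem.List.pyRange 0 (bits.length : Int) 15).foldl
      (fun out i => '\n' :: (PySem.List.slice bits (some i) (some (i + 15)) ++ out)) [])

-- ===== PRECONDITION & SPEC =====
def hexDigitChars : List Char :=
  ['0','1','2','3','4','5','6','7','8','9','a','b','c','d','e','f','A','B','C','D','E','F']

-- Pre_ excludes the inputs on which int(readmap, 16) raises ValueError (A raises there), and the
-- int-literal decorations (whitespace, sign, 0x prefix, '_' separators) that int() accepts but a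
-- per-digit reading rejects: on those B raises ValueError (int of a single non-hex-digit character).
def Pre_convert_mdf_to_binary (readmap : String) : Prop :=
  readmap.toList.isEmpty = false ∧ readmap.toList.all (fun c => hexDigitChars.contains c) = true
instance (readmap : String) : Decidable (Pre_convert_mdf_to_binary readmap) := by
  unfold Pre_convert_mdf_to_binary; infer_instance

def pvWitness_convert_mdf_to_binary : String := "1a2B3c"

def Spec_convert_mdf_to_binary (readmap : String) (out : String) : Prop :=
  out = convert_mdf_to_binary_alt readmap
instance (readmap : String) (out : String) : Decidable (Spec_convert_mdf_to_binary readmap out) := by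
  unfold Spec_convert_mdf_to_binary; infer_instance

-- ===== CLAIM (what is proved, stated in full; the proofs are below) =====
def Claim_equal_convert_mdf_to_binary : Prop := ∀ (readmap : String), Dom_convert_mdf_to_binary readmap → Pre_convert_mdf_to_binary readmap → Spec_convert_mdf_to_binary readmap (convert_mdf_to_binary readmap)

-- ===== LEMMAS AND PROOFS =====

-- value of a hex digit and of a hex-digit string (proof-side only)
def hexVal (c : Char) : Nat := (PySem.Int.digitVal? c).getD 0

def hexValue (cs : List Char) : Nat := cs.foldl (fun a c => a * 16 + hexVal c) 0

-- n written as exactly k binary digits, most significant first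
def fixedBits : Nat → Nat → List Char
  | _, 0 => []
  | n, k + 1 => fixedBits (n / 2) k ++ [Nat.digitChar (n % 2)]

-- n's binary digits, as "{:b}".format writes them
def bitsOf (n : Nat) : List Char :=
  if h : n < 2 then [Nat.digitChar n] else bitsOf (n / 2) ++ [Nat.digitChar (n % 2)]
  termination_by n
  decreasing_by omega

-- successive 15-character chunks of a list
def chunksOf (l : List Char) : List (List Char) :=
  if h : l.isEmpty then [] else l.take 15 :: chunksOf (l.drop 15)
  termination_by l.length
  decreasing_by
    simp only [List.isEmpty_iff] at h
    have : 0 < l.length := List.length_pos_of_ne_nil h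
    simp only [List.length_drop]; omega

-- facts about a single hex digit, by enumeration of the 22 characters
theorem hex_char_facts (c : Char) (h : c ∈ hexDigitChars) :
    PySem.Int.isIntSpace c = false ∧ c ≠ '-' ∧ c ≠ '+' ∧ c ≠ 'x' ∧ c ≠ 'X' ∧ c ≠ '\n' ∧
    pyHexDigitOk c = true ∧ PySem.Int.digitVal? c = some (hexVal c) ∧ hexVal c < 16 ∧
    nibbleBits c = fixedBits (hexVal c) 4 := by
  fin_cases h <;> exact ⟨rfl, by decide, by decide, by decide, by decide, by decide, rfl, rfl, by decide, rfl⟩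

theorem dropWhile_hex (cs : List Char) (h : ∀ c ∈ cs, c ∈ hexDigitChars) :
    cs.dropWhile PySem.Int.isIntSpace = cs := by
  cases cs with
  | nil => rfl
  | cons c rest =>
    have hc := (hex_char_facts c (h c (by simp))).1
    simp [hc]

theorem go_hex (cs : List Char) (h : ∀ c ∈ cs, c ∈ hexDigitChars) : ∀ acc,
    pyDigits16Go cs true acc = some (cs.foldl (fun a c => a * 16 + hexVal c) acc) := by
  induction cs with
  | nil => intro acc; rfl
  | cons c rest ih =>
    intro acc
    obtain ⟨-, -, -, -, -, -, hok, hval, -, -⟩ := hex_char_facts c (h c (by simp))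
    simp only [pyDigits16Go, hok, if_true, List.foldl_cons, hval, Option.getD_some]
    exact ih (fun x hx => h x (by simp [hx])) _

theorem pyIntHex_hex (cs : List Char) (hne : cs ≠ []) (h : ∀ c ∈ cs, c ∈ hexDigitChars) :
    pyIntHex? cs = some ((hexValue cs : Nat) : Int) := by
  have hrev : ∀ c ∈ cs.reverse, c ∈ hexDigitChars := fun c hc => h c (List.mem_reverse.mp hc)
  obtain ⟨c, rest, rfl⟩ := List.exists_cons_of_ne_nil hne
  obtain ⟨-, hm, hp, hx, hX, -, -, -, -, -⟩ := hex_char_facts c (h c (by simp))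
  simp only [pyIntHex?, dropWhile_hex _ h, dropWhile_hex _ hrev, List.reverse_reverse]
  simp only [if_neg hm, if_neg hp]
  have husePfx : (match c :: rest with
      | c0 :: c1 :: _ => c0 = '0' && (c1 = 'x' || c1 = 'X')
      | _ => false) = false := by
    cases rest with
    | nil => rfl
    | cons c1 r =>
      obtain ⟨-, -, -, hx1, hX1, -, -, -, -, -⟩ := hex_char_facts c1 (h c1 (by simp))
      simp [hx1, hX1]
  simp only [husePfx, Bool.false_eq_true, if_false]
  have hgo : pyDigits16? (c :: rest) = some (hexValue (c :: rest)) := by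
    obtain ⟨-, -, -, -, -, -, hok, hval, -, -⟩ := hex_char_facts c (h c (by simp))
    simp only [pyDigits16?, pyDigits16Go, hok, if_true, hval, Option.getD_some]
    rw [go_hex rest (fun x hx => h x (by simp [hx]))]
    rfl
  simp [hgo]

theorem toDigitsCore_eq (f : Nat) : ∀ n ds, n < f →
    Nat.toDigitsCore 2 f n ds = bitsOf n ++ ds := by
  induction f with
  | zero => intro n ds hn; omega
  | succ f ih =>
    intro n ds hn
    rw [Nat.toDigitsCore]
    by_cases h2 : n / 2 = 0
    · have hn2 : n < 2 := by omega
      rw [if_pos h2, bitsOf, dif_pos hn2]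
      have : n % 2 = n := Nat.mod_eq_of_lt hn2
      simp [this]
    · rw [if_neg h2, ih (n / 2) _ (by omega)]
      have hb : bitsOf n = bitsOf (n / 2) ++ [Nat.digitChar (n % 2)] := by
        rw [bitsOf, dif_neg (show ¬ n < 2 by omega)]
      rw [hb]; simp

theorem toBin_natCast (n : Nat) : PySem.Int.toBinChars (n : Int) = bitsOf n := by
  rw [PySem.Int.toBinChars, if_neg (by omega)]
  show Nat.toDigits 2 (Int.toNat n) = _
  rw [Int.toNat_natCast, Nat.toDigits, toDigitsCore_eq (n + 1) n [] (by omega), List.append_nil]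

theorem fixedBits_chars (k : Nat) : ∀ n, ∀ c ∈ fixedBits n k, c = '0' ∨ c = '1' := by
  induction k with
  | zero => intro n c hc; simp [fixedBits] at hc
  | succ k ih =>
    intro n c hc
    simp only [fixedBits, List.mem_append, List.mem_singleton] at hc
    rcases hc with hc | rfl
    · exact ih _ c hc
    · have : n % 2 = 0 ∨ n % 2 = 1 := by omega
      rcases this with h | h <;> simp [h, Nat.digitChar]

theorem bitsOf_lt (n : Nat) : n < 2 ^ (bitsOf n).length := by
  induction n using Nat.strong_induction_on with
  | _ n ih =>
    rw [bitsOf]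
    by_cases h2 : n < 2
    · simp [h2]
    · rw [dif_neg h2]
      have := ih (n / 2) (by omega)
      simp only [List.length_append, List.length_singleton]
      have h3 : 2 ^ ((bitsOf (n / 2)).length + 1) = 2 ^ (bitsOf (n / 2)).length * 2 := by ring
      omega

theorem bitsOf_len_le (k : Nat) : ∀ n, n < 2 ^ k → 1 ≤ k → (bitsOf n).length ≤ k := by
  induction k with
  | zero => intro n h hk; omega
  | succ k ih =>
    intro n h hk
    rw [bitsOf]
    by_cases h2 : n < 2
    · simp [h2]
    · rw [dif_neg h2]
      simp only [List.length_append, List.length_singleton]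
      have hk1 : 1 ≤ k := by
        by_contra hc
        have : k = 0 := by omega
        subst this; simp at h; omega
      have := ih (n / 2) (by rw [pow_succ] at h; omega) hk1
      omega

theorem fixedBits_eq_bitsOf (n : Nat) : fixedBits n (bitsOf n).length = bitsOf n := by
  induction n using Nat.strong_induction_on with
  | _ n ih =>
    by_cases h2 : n < 2
    · rw [bitsOf, dif_pos h2]
      show fixedBits n 1 = _
      have : n % 2 = n := Nat.mod_eq_of_lt h2
      simp [fixedBits, this]
    · have hb : bitsOf n = bitsOf (n / 2) ++ [Nat.digitChar (n % 2)] := by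
        rw [bitsOf, dif_neg h2]
      rw [hb]
      simp only [List.length_append, List.length_singleton]
      show fixedBits (n / 2) (bitsOf (n / 2)).length ++ _ = _
      rw [ih (n / 2) (by omega)]

theorem fixedBits_cons0 (k : Nat) : ∀ n, n < 2 ^ k → fixedBits n (k + 1) = '0' :: fixedBits n k := by
  induction k with
  | zero =>
    intro n h
    have : n = 0 := by omega
    subst this; rfl
  | succ k ih =>
    intro n h
    show fixedBits (n / 2) (k + 1) ++ _ = '0' :: (fixedBits (n / 2) k ++ _)
    rw [ih (n / 2) (by rw [pow_succ] at h; omega)]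
    rfl

theorem pad_eq_fixedBits (n k : Nat) (hk : n < 2 ^ k) (hl : (bitsOf n).length ≤ k) :
    List.replicate (k - (bitsOf n).length) '0' ++ bitsOf n = fixedBits n k := by
  obtain ⟨d, rfl⟩ : ∃ d, k = (bitsOf n).length + d := ⟨k - (bitsOf n).length, by omega⟩
  clear hk hl
  induction d with
  | zero => simpa using (fixedBits_eq_bitsOf n).symm
  | succ d ih =>
    have hlt : n < 2 ^ ((bitsOf n).length + d) :=
      lt_of_lt_of_le (bitsOf_lt n) (Nat.pow_le_pow_right (by omega) (by omega))
    rw [show (bitsOf n).length + (d + 1) = ((bitsOf n).length + d) + 1 by omega,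
        fixedBits_cons0 _ n hlt, ← ih]
    rw [show (bitsOf n).length + d + 1 - (bitsOf n).length = d + 1 by omega,
        show (bitsOf n).length + d - (bitsOf n).length = d by omega,
        List.replicate_succ]
    simp

theorem fixedBits_split (j : Nat) : ∀ n k,
    fixedBits n (k + j) = fixedBits (n / 2 ^ j) k ++ fixedBits (n % 2 ^ j) j := by
  induction j with
  | zero => intro n k; simp [fixedBits]
  | succ j ih =>
    intro n k
    show fixedBits n ((k + j) + 1) = _
    have e1 : n / 2 / 2 ^ j = n / 2 ^ (j + 1) := by
      rw [Nat.div_div_eq_div_mul, ← pow_succ']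
    have e2 : n / 2 % 2 ^ j = n % 2 ^ (j + 1) / 2 := by
      rw [← Nat.mod_mul_right_div_self, ← pow_succ']
    have e3 : n % 2 = n % 2 ^ (j + 1) % 2 := by
      rw [Nat.mod_mod_of_dvd n (dvd_pow_self 2 (by omega))]
    calc fixedBits n ((k + j) + 1)
        = fixedBits (n / 2) (k + j) ++ [Nat.digitChar (n % 2)] := rfl
      _ = (fixedBits (n / 2 / 2 ^ j) k ++ fixedBits (n / 2 % 2 ^ j) j) ++ [Nat.digitChar (n % 2)] := by
          rw [ih]
      _ = fixedBits (n / 2 ^ (j + 1)) k ++ (fixedBits (n % 2 ^ (j + 1) / 2) j ++ [Nat.digitChar (n % 2 ^ (j + 1) % 2)]) := by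
          rw [e1, e2, e3, List.append_assoc]
      _ = fixedBits (n / 2 ^ (j + 1)) k ++ fixedBits (n % 2 ^ (j + 1)) (j + 1) := rfl

theorem hexValue_lt (cs : List Char) (h : ∀ c ∈ cs, c ∈ hexDigitChars) : ∀ acc,
    cs.foldl (fun a c => a * 16 + hexVal c) acc < (acc + 1) * 16 ^ cs.length := by
  induction cs with
  | nil => intro acc; simp
  | cons c rest ih =>
    intro acc
    obtain ⟨-, -, -, -, -, -, -, -, hv, -⟩ := hex_char_facts c (h c (by simp))
    have h1 := ih (fun x hx => h x (by simp [hx])) (acc * 16 + hexVal c)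
    have h2 : (acc * 16 + hexVal c + 1) * 16 ^ rest.length ≤ (acc + 1) * 16 ^ (rest.length + 1) := by
      have : acc * 16 + hexVal c + 1 ≤ (acc + 1) * 16 := by omega
      calc (acc * 16 + hexVal c + 1) * 16 ^ rest.length
          ≤ ((acc + 1) * 16) * 16 ^ rest.length := Nat.mul_le_mul_right _ this
        _ = (acc + 1) * 16 ^ (rest.length + 1) := by ring
    simpa using lt_of_lt_of_le h1 h2

theorem flatMap_nibble (cs : List Char) (h : ∀ c ∈ cs, c ∈ hexDigitChars) :
    cs.flatMap nibbleBits = fixedBits (hexValue cs) (4 * cs.length) := by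
  induction cs using List.reverseRecOn with
  | nil => rfl
  | append_singleton cs c ih =>
    obtain ⟨-, -, -, -, -, -, -, -, hv, hnib⟩ := hex_char_facts c (h c (by simp))
    have hval : hexValue (cs ++ [c]) = hexValue cs * 16 + hexVal c := by
      simp [hexValue, List.foldl_append]
    have hdiv : (hexValue cs * 16 + hexVal c) / 2 ^ 4 = hexValue cs := by
      have : (2 : Nat) ^ 4 = 16 := by norm_num
      rw [this]; omega
    have hmod : (hexValue cs * 16 + hexVal c) % 2 ^ 4 = hexVal c := by
      have : (2 : Nat) ^ 4 = 16 := by norm_num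
      rw [this]; omega
    rw [List.flatMap_append, ih (fun x hx => h x (by simp [hx])), hval,
        show 4 * (cs ++ [c]).length = 4 * cs.length + 4 by simp; ring,
        fixedBits_split 4, hdiv, hmod]
    simp [hnib]

theorem pad_bits_eq (cs : List Char) (hne : cs ≠ []) (h : ∀ c ∈ cs, c ∈ hexDigitChars) :
    List.replicate (((cs.length : Int) * 4 - ((bitsOf (hexValue cs)).length : Int)).toNat) '0'
      ++ bitsOf (hexValue cs) = fixedBits (hexValue cs) (4 * cs.length) := by
  have hlt : hexValue cs < 2 ^ (4 * cs.length) := by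
    have := hexValue_lt cs h 0
    simpa [hexValue, show (2 : Nat) ^ (4 * cs.length) = 16 ^ cs.length by
      rw [pow_mul]; norm_num] using this
  have hlen1 : 1 ≤ cs.length := List.length_pos_of_ne_nil hne
  have hle : (bitsOf (hexValue cs)).length ≤ 4 * cs.length :=
    bitsOf_len_le _ _ hlt (by omega)
  have : (((cs.length : Int) * 4 - ((bitsOf (hexValue cs)).length : Int)).toNat) =
      4 * cs.length - (bitsOf (hexValue cs)).length := by omega
  rw [this, pad_eq_fixedBits _ _ hlt hle]

-- ---- the chunking / splitting / joining tail ----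

theorem pyRange15_nil (L : Int) (h : L ≤ 0) : PySem.List.pyRange 0 L 15 = [] := by
  rw [PySem.List.pyRange_of_pos 0 L (by norm_num), if_neg (by omega)]
  rfl

theorem pyRange15_shift (L : Int) (h : 0 < L) :
    PySem.List.pyRange 0 L 15 = 0 :: (PySem.List.pyRange 0 (L - 15) 15).map (· + 15) := by
  rw [PySem.List.pyRange_of_pos 0 L (by norm_num),
      PySem.List.pyRange_of_pos 0 (L - 15) (by norm_num)]
  by_cases h15 : 0 < L - 15
  · rw [if_pos h, if_pos (by omega)]
    have hN : ((L - 0 + 15 - 1) / 15).toNat = ((L - 15 - 0 + 15 - 1) / 15).toNat + 1 := by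
      omega
    rw [hN, List.range_succ_eq_map]
    simp only [List.map_cons, List.map_map]
    congr 1
  · rw [if_pos h, if_neg (by omega)]
    have hN : ((L - 0 + 15 - 1) / 15).toNat = 1 := by omega
    rw [hN]
    rfl

theorem slice_shift (bits : List Char) (i : Int) (hi : 0 ≤ i) :
    PySem.List.slice bits (some (i + 15)) (some (i + 15 + 15)) =
    PySem.List.slice (bits.drop 15) (some i) (some (i + 15)) := by
  rw [PySem.List.slice_toNat _ (by omega) (by omega),
      PySem.List.slice_toNat _ hi (by omega),
      List.drop_drop,
      show (i + 15 + 15).toNat = i.toNat + 15 + 15 by omega,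
      show (i + 15).toNat = i.toNat + 15 by omega]
  congr 1
  all_goals first | omega | rw [Nat.add_comm]

theorem drop15_len (bits : List Char) (h : ¬ bits.length ≤ 15) :
    ((bits.drop 15).length : Int) = (bits.length : Int) - 15 := by
  simp [List.length_drop]
  omega

theorem chunkA (n : Nat) : ∀ bits : List Char, bits.length ≤ n →
    (PySem.List.pyRange 0 (bits.length : Int) 15).map
      (fun i => PySem.List.slice bits (some i) (some (i + 15)) ++ ['\n']) =
    (chunksOf bits).map (· ++ ['\n']) := by
  induction n with
  | zero =>
    intro bits hb
    have : bits = [] := List.eq_nil_of_length_eq_zero (by omega)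
    subst this
    rw [pyRange15_nil _ (by simp), chunksOf]
    simp
  | succ n ih =>
    intro bits hb
    by_cases hnil : bits = []
    · subst hnil
      rw [pyRange15_nil _ (by simp), chunksOf]
      simp
    · have hpos : 0 < bits.length := List.length_pos_of_ne_nil hnil
      rw [pyRange15_shift _ (by exact_mod_cast hpos), chunksOf,
          dif_neg (by simp [List.isEmpty_iff, hnil])]
      simp only [List.map_cons, List.map_map]
      congr 1
      · rw [PySem.List.slice_toNat _ (by norm_num) (by norm_num)]
        norm_num
        omega
      · rw [← ih (bits.drop 15) (by simp [List.length_drop]; omega)]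
        by_cases h15 : bits.length ≤ 15
        · have e1 : bits.length - 15 = 0 := by omega
          rw [pyRange15_nil ((bits.length : Int) - 15) (by omega),
              pyRange15_nil ((bits.drop 15).length : Int) (by simp [List.length_drop]; omega)]
          rfl
        · rw [drop15_len bits h15]
          apply List.map_congr_left
          intro i hi
          have h0i : 0 ≤ i := by
            rcases (PySem.List.mem_pyRange_iff_of_pos (by norm_num) i).mp hi with ⟨h1, -⟩
            omega
          simp only [Function.comp_apply]
          rw [slice_shift bits i h0i]

theorem chunkB (n : Nat) : ∀ bits : List Char, bits.length ≤ n → ∀ out0,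
    (PySem.List.pyRange 0 (bits.length : Int) 15).foldl
      (fun out i => '\n' :: (PySem.List.slice bits (some i) (some (i + 15)) ++ out)) out0 =
    (chunksOf bits).foldl (fun out ch => '\n' :: (ch ++ out)) out0 := by
  induction n with
  | zero =>
    intro bits hb out0
    have : bits = [] := List.eq_nil_of_length_eq_zero (by omega)
    subst this
    rw [pyRange15_nil _ (by simp), chunksOf]
    simp
  | succ n ih =>
    intro bits hb out0
    by_cases hnil : bits = []
    · subst hnil
      rw [pyRange15_nil _ (by simp), chunksOf]
      simp
    · have hpos : 0 < bits.length := List.length_pos_of_ne_nil hnil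
      rw [pyRange15_shift _ (by exact_mod_cast hpos), chunksOf,
          dif_neg (by simp [List.isEmpty_iff, hnil])]
      simp only [List.foldl_cons, List.foldl_map]
      have e0 : PySem.List.slice bits (some 0) (some (0 + 15)) = bits.take 15 := by
        rw [PySem.List.slice_toNat _ (by norm_num) (by norm_num)]
        norm_num
        omega
      rw [e0, ← ih (bits.drop 15) (by simp [List.length_drop]; omega)]
      by_cases h15 : bits.length ≤ 15
      · rw [pyRange15_nil ((bits.length : Int) - 15) (by omega),
            pyRange15_nil ((bits.drop 15).length : Int) (by simp [List.length_drop]; omega)]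
        rfl
      · rw [drop15_len bits h15]
        apply PySem.List.foldl_congr_mem
        intro acc i hi
        have h0i : 0 ≤ i := by
          rcases (PySem.List.mem_pyRange_iff_of_pos (by norm_num) i).mp hi with ⟨h1, -⟩
          omega
        rw [slice_shift bits i h0i]

theorem chunksOf_mem (n : Nat) : ∀ l : List Char, l.length ≤ n →
    ∀ ch ∈ chunksOf l, ∀ x ∈ ch, x ∈ l := by
  induction n with
  | zero =>
    intro l hl ch hch
    have : l = [] := List.eq_nil_of_length_eq_zero (by omega)
    subst this
    rw [chunksOf] at hch
    simp at hch
  | succ n ih =>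
    intro l hl ch hch x hx
    by_cases hnil : l = []
    · subst hnil; rw [chunksOf] at hch; simp at hch
    · rw [chunksOf, dif_neg (by simp [List.isEmpty_iff, hnil])] at hch
      rcases List.mem_cons.mp hch with rfl | hch
      · exact List.mem_of_mem_take hx
      · have hpos : 0 < l.length := List.length_pos_of_ne_nil hnil
        exact List.mem_of_mem_drop
          (ih (l.drop 15) (by simp [List.length_drop]; omega) ch hch x hx)

theorem go_nil (fuel : Nat) (cur : List Char) (acc : List (List Char)) :
    PySem.Chars.splitOn.go ['\n'] fuel [] cur acc = (cur.reverse :: acc).reverse := by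
  cases fuel with
  | zero => simp [PySem.Chars.splitOn.go]
  | succ fuel => simp [PySem.Chars.splitOn.go]

theorem go_step (fuel : Nat) (c : Char) (hc : c ≠ '\n') (rest cur : List Char) (acc : List (List Char)) :
    PySem.Chars.splitOn.go ['\n'] (fuel + 1) (c :: rest) cur acc =
    PySem.Chars.splitOn.go ['\n'] fuel rest (c :: cur) acc := by
  have hpre : (['\n'].isPrefixOf (c :: rest)) = false := by
    simp [List.isPrefixOf]
    exact fun h => absurd h.symm hc
  simp [PySem.Chars.splitOn.go, hpre]

theorem go_sep (fuel : Nat) (rest cur : List Char) (acc : List (List Char)) :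
    PySem.Chars.splitOn.go ['\n'] (fuel + 1) ('\n' :: rest) cur acc =
    PySem.Chars.splitOn.go ['\n'] fuel rest [] (cur.reverse :: acc) := by
  have hpre : (['\n'].isPrefixOf ('\n' :: rest)) = true := by
    simp [List.isPrefixOf]
  simp [PySem.Chars.splitOn.go, hpre]

theorem go_chunk (chunk : List Char) (hch : ∀ c ∈ chunk, c ≠ '\n') :
    ∀ (l cur : List Char) (acc : List (List Char)) (fuel : Nat),
    PySem.Chars.splitOn.go ['\n'] (fuel + chunk.length) (chunk ++ l) cur acc =
    PySem.Chars.splitOn.go ['\n'] fuel l (chunk.reverse ++ cur) acc := by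
  induction chunk with
  | nil => intro l cur acc fuel; simp
  | cons c ch ih =>
    intro l cur acc fuel
    rw [show fuel + (c :: ch).length = (fuel + ch.length) + 1 by simp; omega,
        List.cons_append, go_step _ c (hch c (by simp)) _ _ _,
        ih (fun x hx => hch x (by simp [hx])) l (c :: cur) acc fuel]
    simp

theorem split_joined (ls : List (List Char)) (h : ∀ ch ∈ ls, ∀ c ∈ ch, c ≠ '\n') :
    ∀ (acc : List (List Char)) (fuel : Nat),
    PySem.Chars.splitOn.go ['\n'] (fuel + ((ls.map (· ++ ['\n'])).flatten).length)
      ((ls.map (· ++ ['\n'])).flatten) [] acc = acc.reverse ++ (ls ++ [[]]) := by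
  induction ls with
  | nil =>
    intro acc fuel
    simp [go_nil]
  | cons ch ls ih =>
    intro acc fuel
    have hflat : ((ch :: ls).map (· ++ ['\n'])).flatten =
        ch ++ ('\n' :: (ls.map (· ++ ['\n'])).flatten) := by
      simp
    rw [hflat,
        show fuel + (ch ++ '\n' :: (ls.map (· ++ ['\n'])).flatten).length =
          ((fuel + 1 + ((ls.map (· ++ ['\n'])).flatten).length)) + ch.length by
            simp only [List.length_append, List.length_cons]; omega,
        go_chunk ch (h ch (by simp)) _ _ _ _,
        List.append_nil,
        show fuel + 1 + ((ls.map (· ++ ['\n'])).flatten).length =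
          (fuel + ((ls.map (· ++ ['\n'])).flatten).length) + 1 by omega,
        go_sep, List.reverse_reverse,
        ih (fun x hx => h x (by simp [hx])) (ch :: acc) fuel]
    simp

theorem splitOn_joined (ls : List (List Char)) (h : ∀ ch ∈ ls, ∀ c ∈ ch, c ≠ '\n') :
    PySem.Chars.splitOn ((ls.map (· ++ ['\n'])).flatten) ['\n'] = ls ++ [[]] := by
  rw [PySem.Chars.splitOn,
      show ((ls.map (· ++ ['\n'])).flatten).length + 1 =
        1 + ((ls.map (· ++ ['\n'])).flatten).length by omega,
      split_joined ls h [] 1]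
  rfl

theorem join_foldr (rest : List (List Char)) : ∀ q,
    PySem.Chars.join ['\n'] (q :: rest) =
    q ++ rest.foldr (fun ch out => '\n' :: (ch ++ out)) [] := by
  induction rest with
  | nil => intro q; simp [PySem.Chars.join_singleton]
  | cons r rs ih =>
    intro q
    rw [PySem.Chars.join_cons_cons, ih r]
    simp

-- ===== VERDICT (by name: the statement is the Claim_ definition above) =====
theorem convert_mdf_to_binary_spec : Claim_equal_convert_mdf_to_binary := by
  intro readmap _ hpre
  obtain ⟨hne0, hall0⟩ := hpre
  have hne : readmap.toList ≠ [] := fun hh => by simp [hh] at hne0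
  have hhex : ∀ c ∈ readmap.toList, c ∈ hexDigitChars := by
    intro c hc
    exact List.contains_iff_mem.mp (List.all_eq_true.mp hall0 c hc)
  show convert_mdf_to_binary readmap = convert_mdf_to_binary_alt readmap
  have hparse := pyIntHex_hex readmap.toList hne hhex
  -- the un-sliced bit string both programs build
  have hbin : List.replicate (((readmap.toList.length : Int) * 4 -
        ((PySem.Int.toBinChars ((hexValue readmap.toList : Nat) : Int)).length : Int)).toNat) '0' ++
        PySem.Int.toBinChars ((hexValue readmap.toList : Nat) : Int) =
      fixedBits (hexValue readmap.toList) (4 * readmap.toList.length) := by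
    rw [toBin_natCast]
    exact pad_bits_eq readmap.toList hne hhex
  have hnib : readmap.toList.flatMap nibbleBits =
      fixedBits (hexValue readmap.toList) (4 * readmap.toList.length) :=
    flatMap_nibble readmap.toList hhex
  rw [convert_mdf_to_binary, convert_mdf_to_binary_alt]
  simp only [hparse, Option.getD_some, hbin, hnib]
  -- both sides now slice the same bit string
  set bits := PySem.List.slice (fixedBits (hexValue readmap.toList) (4 * readmap.toList.length))
      none (some (-4)) with hbits
  have hclean : ∀ ch ∈ chunksOf bits, ∀ c ∈ ch, c ≠ '\n' := by
    intro ch hch c hc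
    have hcb : c ∈ bits := chunksOf_mem bits.length bits (le_refl _) ch hch c hc
    have : c ∈ fixedBits (hexValue readmap.toList) (4 * readmap.toList.length) :=
      PySem.List.mem_of_mem_slice _ _ _ hcb
    rcases fixedBits_chars _ _ c this with rfl | rfl <;> decide
  rw [chunkA bits.length bits (le_refl _), chunkB bits.length bits (le_refl _),
      splitOn_joined (chunksOf bits) hclean,
      PySem.List.slice?_none_none_neg_one, Option.getD_some]
  have hrev : (chunksOf bits ++ [[]]).reverse = [] :: (chunksOf bits).reverse := by simp
  rw [hrev, join_foldr, List.foldl_eq_foldr_reverse]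
  simp
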